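-- pv_equiv track=rewrite | github.com/Daniel-Souza7/thesis-new-files | optimal_stopping/utilities/comparison_table.py | _categorize_payoffs
-- ===== SOURCE A (Python) =====
-- def _categorize_payoffs(all_payoffs):
--     """Categorize payoffs into families."""
--     families = {
--         'Standard Options': [],
--         'Up-and-Out Barriers': [],
--         'Down-and-Out Barriers': [],
--         'Up-and-In Barriers': [],
--         'Down-and-In Barriers': [],
--         'Lookback Options': [],
--         'Asian Options': []
--     }
--
--     for payoff in all_payoffs:
--         if 'UpAndOut' in payoff:
--             families['Up-and-Out Barriers'].append(payoff)
--         elif 'DownAndOut' in payoff: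
--             families['Down-and-Out Barriers'].append(payoff)
--         elif 'UpAndIn' in payoff:
--             families['Up-and-In Barriers'].append(payoff)
--         elif 'DownAndIn' in payoff:
--             families['Down-and-In Barriers'].append(payoff)
--         elif 'Lookback' in payoff:
--             families['Lookback Options'].append(payoff)
--         elif 'Asian' in payoff:
--             families['Asian Options'].append(payoff)
--         else:
--             families['Standard Options'].append(payoff)
--
--     for family in families:
--         families[family] = sorted(families[family])
--
--     return {k: v for k, v in families.items() if v}
-- ===== SOURCE B (Python) =====
-- _FAMILY_TESTS = [
--     ('Up-and-Out Barriers', 'UpAndOut'),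
--     ('Down-and-Out Barriers', 'DownAndOut'),
--     ('Up-and-In Barriers', 'UpAndIn'),
--     ('Down-and-In Barriers', 'DownAndIn'),
--     ('Lookback Options', 'Lookback'),
--     ('Asian Options', 'Asian'),
-- ]
--
-- _FAMILY_NAMES = ['Standard Options'] + [name for name, _ in _FAMILY_TESTS]
--
--
-- def _family_of(payoff):
--     for name, sub in _FAMILY_TESTS:
--         if sub in payoff:
--             return name
--     return 'Standard Options'
--
--
-- def _categorize_payoffs(all_payoffs):
--     """Categorize payoffs into families."""
--     ordered = sorted(all_payoffs)
--     return {name: members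
--             for name in _FAMILY_NAMES
--             if (members := [p for p in ordered if _family_of(p) == name])}
-- ===== Notes on version B (the rewrite author's own statement) =====
-- stated objective: alternative
-- what changed: A classifies payoffs into a pre-keyed dict in input order and then sorts each family list separately; B sorts the whole input once up front and builds each family by filtering the globally sorted list through a family-of classifier, so no per-family sort loop exists.
import Mathlib
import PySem

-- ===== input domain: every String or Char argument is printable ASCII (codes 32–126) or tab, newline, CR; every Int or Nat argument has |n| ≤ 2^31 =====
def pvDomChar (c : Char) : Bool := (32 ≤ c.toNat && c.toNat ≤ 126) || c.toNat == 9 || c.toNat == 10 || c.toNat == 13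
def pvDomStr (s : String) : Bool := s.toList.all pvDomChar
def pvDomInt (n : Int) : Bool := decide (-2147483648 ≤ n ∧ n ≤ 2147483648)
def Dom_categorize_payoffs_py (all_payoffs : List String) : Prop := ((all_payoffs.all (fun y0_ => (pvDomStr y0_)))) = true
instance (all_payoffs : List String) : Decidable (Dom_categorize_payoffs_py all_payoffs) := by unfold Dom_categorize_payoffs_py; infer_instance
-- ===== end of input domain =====

-- B replaces A's classify-then-sort-each-family pass with ONE global sort followed by
-- per-family filters of the sorted list (objective: alternative decomposition, same cost class).

-- ===== PORT A =====
-- one step of A's classification loop (the if/elif ladder, appending into the dict)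
def pvStepA (d : PySem.Dict String (List String)) (payoff : String) : PySem.Dict String (List String) :=
  if PySem.Str.isIn "UpAndOut" payoff then d.modify "Up-and-Out Barriers" [] (· ++ [payoff])
  else if PySem.Str.isIn "DownAndOut" payoff then d.modify "Down-and-Out Barriers" [] (· ++ [payoff])
  else if PySem.Str.isIn "UpAndIn" payoff then d.modify "Up-and-In Barriers" [] (· ++ [payoff])
  else if PySem.Str.isIn "DownAndIn" payoff then d.modify "Down-and-In Barriers" [] (· ++ [payoff])
  else if PySem.Str.isIn "Lookback" payoff then d.modify "Lookback Options" [] (· ++ [payoff])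
  else if PySem.Str.isIn "Asian" payoff then d.modify "Asian Options" [] (· ++ [payoff])
  else d.modify "Standard Options" [] (· ++ [payoff])

def categorize_payoffs_py (all_payoffs : List String) : List (String × List String) :=
  let families : PySem.Dict String (List String) := PySem.Dict.ofList
    [("Standard Options", []), ("Up-and-Out Barriers", []), ("Down-and-Out Barriers", []),
     ("Up-and-In Barriers", []), ("Down-and-In Barriers", []),
     ("Lookback Options", []), ("Asian Options", [])]
  let families := all_payoffs.foldl pvStepA families
  -- for family in families: families[family] = sorted(families[family])
  -- (families[family] always exists here; ported via getD with unused default [])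
  let families := families.keys.foldl
    (fun d k => d.insert k (PySem.List.sorted (d.getD k []) (fun x => x) false)) families
  -- {k: v for k, v in families.items() if v}
  families.items.filter (fun kv => !kv.2.isEmpty)

-- ===== PORT B =====
def pvFamilyTests : List (String × String) :=
  [("Up-and-Out Barriers", "UpAndOut"), ("Down-and-Out Barriers", "DownAndOut"),
   ("Up-and-In Barriers", "UpAndIn"), ("Down-and-In Barriers", "DownAndIn"),
   ("Lookback Options", "Lookback"), ("Asian Options", "Asian")]

def pvFamilyNames : List String := "Standard Options" :: pvFamilyTests.map (·.1)

-- _family_of's loop with early return, as structural recursion over the test list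
def pvFamilyOfAux : List (String × String) → String → String
  | [], _ => "Standard Options"
  | (name, sub) :: rest, p => if PySem.Str.isIn sub p then name else pvFamilyOfAux rest p

def pvFamilyOf (p : String) : String := pvFamilyOfAux pvFamilyTests p

def categorize_payoffs_py_alt (all_payoffs : List String) : List (String × List String) :=
  let ordered := PySem.List.sorted all_payoffs (fun x => x) false
  (pvFamilyNames.map (fun name => (name, ordered.filter (fun p => pvFamilyOf p == name)))).filter
    (fun kv => !kv.2.isEmpty)

-- ===== PRECONDITION & SPEC =====
def Spec_categorize_payoffs_py (all_payoffs : List String) (out : List (String × List String)) : Prop := out = categorize_payoffs_py_alt all_payoffs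
instance (all_payoffs : List String) (out : List (String × List String)) : Decidable (Spec_categorize_payoffs_py all_payoffs out) := by unfold Spec_categorize_payoffs_py; infer_instance

-- ===== CLAIM (what is proved, stated in full; the proofs are below) =====
def Claim_equal_categorize_payoffs_py : Prop := ∀ (all_payoffs : List String), Dom_categorize_payoffs_py all_payoffs → Spec_categorize_payoffs_py all_payoffs (categorize_payoffs_py all_payoffs)

-- ===== LEMMAS AND PROOFS =====

-- abbreviation for the per-family membership test used on both sides of the proof
def pvIsFam (n : String) : String → Bool := fun p => pvFamilyOf p == n

-- invariant of A's classification loop: each family's list accumulates, in input order,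
-- exactly the payoffs whose (priority-ladder) family is that family
lemma pvLoopA (xs : List String) : ∀ (v1 v2 v3 v4 v5 v6 v7 : List String),
    xs.foldl pvStepA (PySem.Dict.mk
      [("Standard Options", v1), ("Up-and-Out Barriers", v2), ("Down-and-Out Barriers", v3),
       ("Up-and-In Barriers", v4), ("Down-and-In Barriers", v5),
       ("Lookback Options", v6), ("Asian Options", v7)]) =
    PySem.Dict.mk
      [("Standard Options", v1 ++ xs.filter (pvIsFam "Standard Options")),
       ("Up-and-Out Barriers", v2 ++ xs.filter (pvIsFam "Up-and-Out Barriers")),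
       ("Down-and-Out Barriers", v3 ++ xs.filter (pvIsFam "Down-and-Out Barriers")),
       ("Up-and-In Barriers", v4 ++ xs.filter (pvIsFam "Up-and-In Barriers")),
       ("Down-and-In Barriers", v5 ++ xs.filter (pvIsFam "Down-and-In Barriers")),
       ("Lookback Options", v6 ++ xs.filter (pvIsFam "Lookback Options")),
       ("Asian Options", v7 ++ xs.filter (pvIsFam "Asian Options"))] := by
  induction xs with
  | nil => intro v1 v2 v3 v4 v5 v6 v7; simp
  | cons p t ih =>
    intro v1 v2 v3 v4 v5 v6 v7
    by_cases h1 : PySem.Str.isIn "UpAndOut" p = true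
    case pos => simp at h1; simp [pvStepA, h1, PySem.Dict.modify, PySem.Dict.insert, PySem.Dict.contains,
      PySem.Dict.getD, PySem.Dict.get?, ih, pvIsFam, pvFamilyOf, pvFamilyOfAux, pvFamilyTests]
    case neg =>
    by_cases h2 : PySem.Str.isIn "DownAndOut" p = true
    case pos => simp at h1 h2; simp [pvStepA, h1, h2, PySem.Dict.modify, PySem.Dict.insert, PySem.Dict.contains,
      PySem.Dict.getD, PySem.Dict.get?, ih, pvIsFam, pvFamilyOf, pvFamilyOfAux, pvFamilyTests]
    case neg =>
    by_cases h3 : PySem.Str.isIn "UpAndIn" p = true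
    case pos => simp at h1 h2 h3; simp [pvStepA, h1, h2, h3, PySem.Dict.modify, PySem.Dict.insert, PySem.Dict.contains,
      PySem.Dict.getD, PySem.Dict.get?, ih, pvIsFam, pvFamilyOf, pvFamilyOfAux, pvFamilyTests]
    case neg =>
    by_cases h4 : PySem.Str.isIn "DownAndIn" p = true
    case pos => simp at h1 h2 h3 h4; simp [pvStepA, h1, h2, h3, h4, PySem.Dict.modify, PySem.Dict.insert, PySem.Dict.contains,
      PySem.Dict.getD, PySem.Dict.get?, ih, pvIsFam, pvFamilyOf, pvFamilyOfAux, pvFamilyTests]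
    case neg =>
    by_cases h5 : PySem.Str.isIn "Lookback" p = true
    case pos => simp at h1 h2 h3 h4 h5; simp [pvStepA, h1, h2, h3, h4, h5, PySem.Dict.modify, PySem.Dict.insert, PySem.Dict.contains,
      PySem.Dict.getD, PySem.Dict.get?, ih, pvIsFam, pvFamilyOf, pvFamilyOfAux, pvFamilyTests]
    case neg =>
    by_cases h6 : PySem.Str.isIn "Asian" p = true
    case pos => simp at h1 h2 h3 h4 h5 h6; simp [pvStepA, h1, h2, h3, h4, h5, h6, PySem.Dict.modify, PySem.Dict.insert, PySem.Dict.contains,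
      PySem.Dict.getD, PySem.Dict.get?, ih, pvIsFam, pvFamilyOf, pvFamilyOfAux, pvFamilyTests]
    case neg => simp at h1 h2 h3 h4 h5 h6; simp [pvStepA, h1, h2, h3, h4, h5, h6, PySem.Dict.modify, PySem.Dict.insert, PySem.Dict.contains,
      PySem.Dict.getD, PySem.Dict.get?, ih, pvIsFam, pvFamilyOf, pvFamilyOfAux, pvFamilyTests]

-- A's result, characterised: per-family filters of the input, each sorted, empties dropped
lemma pvA_eq (xs : List String) :
    categorize_payoffs_py xs =
    ([("Standard Options", PySem.List.sorted (xs.filter (pvIsFam "Standard Options")) (fun x => x) false),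
      ("Up-and-Out Barriers", PySem.List.sorted (xs.filter (pvIsFam "Up-and-Out Barriers")) (fun x => x) false),
      ("Down-and-Out Barriers", PySem.List.sorted (xs.filter (pvIsFam "Down-and-Out Barriers")) (fun x => x) false),
      ("Up-and-In Barriers", PySem.List.sorted (xs.filter (pvIsFam "Up-and-In Barriers")) (fun x => x) false),
      ("Down-and-In Barriers", PySem.List.sorted (xs.filter (pvIsFam "Down-and-In Barriers")) (fun x => x) false),
      ("Lookback Options", PySem.List.sorted (xs.filter (pvIsFam "Lookback Options")) (fun x => x) false),
      ("Asian Options", PySem.List.sorted (xs.filter (pvIsFam "Asian Options")) (fun x => x) false)]).filter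
      (fun kv => !kv.2.isEmpty) := by
  have h0 : (PySem.Dict.ofList
      [("Standard Options", ([] : List String)), ("Up-and-Out Barriers", []), ("Down-and-Out Barriers", []),
       ("Up-and-In Barriers", []), ("Down-and-In Barriers", []),
       ("Lookback Options", []), ("Asian Options", [])]) =
      PySem.Dict.mk
      [("Standard Options", []), ("Up-and-Out Barriers", []), ("Down-and-Out Barriers", []),
       ("Up-and-In Barriers", []), ("Down-and-In Barriers", []),
       ("Lookback Options", []), ("Asian Options", [])] := by decide
  unfold categorize_payoffs_py
  simp only [h0, pvLoopA, List.nil_append]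
  simp [PySem.Dict.keys, PySem.Dict.insert, PySem.Dict.contains,
    PySem.Dict.getD, PySem.Dict.get?, List.find?, List.foldl, List.map]

-- sorting commutes with filtering (the heart of B: filter the globally sorted list)
lemma pvSortedFilter (p : String → Bool) (xs : List String) :
    PySem.List.sorted (xs.filter p) (fun x => x) false =
    (PySem.List.sorted xs (fun x => x) false).filter p :=
  PySem.List.sorted_id_eq_of_perm_of_pairwise _ _
    ((PySem.List.sorted_perm xs (fun x => x) false).filter p)
    ((PySem.List.sorted_pairwise xs (fun x => x)).filter p)

-- ===== VERDICT (by name: the statement is the Claim_ definition above) =====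
theorem categorize_payoffs_py_spec : Claim_equal_categorize_payoffs_py := by
  intro xs _
  unfold Spec_categorize_payoffs_py
  rw [pvA_eq]
  simp only [pvSortedFilter]
  simp [categorize_payoffs_py_alt, pvFamilyNames, pvFamilyTests, List.map]
  rfl
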